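-- pv_equiv track=rewrite | github.com/mdrasmus/compbio | python/rasmus/alignlib.py | revtranslate
-- ===== SOURCE A (Python) =====
-- def revtranslate(aa, dna):
--     """Reverse translates aminoacids (with gaps) into DNA
--
--        Must supply original ungapped DNA.
--     """
--
--     seq = []
--     i = 0
--     for a in aa:
--         if a == "-":
--             seq.append("---")
--         else:
--             seq.append(dna[i:i+3])
--             i += 3
--     return "".join(seq)
-- ===== SOURCE B (Python) =====
-- def revtranslate(aa, dna):
--     """Reverse translates aminoacids (with gaps) into DNA
--
--        Must supply original ungapped DNA.
--     """
--     runs = []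
--     pos = 0
--     for part in aa.split("-"):
--         end = pos + 3 * len(part)
--         runs.append(dna[pos:end])
--         pos = end
--     return "---".join(runs)
-- ===== Notes on version B (the rewrite author's own statement) =====
-- stated objective: faster
-- what changed: B splits aa on '-' into maximal gap-free runs, takes ONE DNA slice of length 3*len(run) per run instead of one 3-char slice per amino acid, and joins the run translations with '---'; per-character branching and per-residue index bookkeeping disappear.
import Mathlib
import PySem

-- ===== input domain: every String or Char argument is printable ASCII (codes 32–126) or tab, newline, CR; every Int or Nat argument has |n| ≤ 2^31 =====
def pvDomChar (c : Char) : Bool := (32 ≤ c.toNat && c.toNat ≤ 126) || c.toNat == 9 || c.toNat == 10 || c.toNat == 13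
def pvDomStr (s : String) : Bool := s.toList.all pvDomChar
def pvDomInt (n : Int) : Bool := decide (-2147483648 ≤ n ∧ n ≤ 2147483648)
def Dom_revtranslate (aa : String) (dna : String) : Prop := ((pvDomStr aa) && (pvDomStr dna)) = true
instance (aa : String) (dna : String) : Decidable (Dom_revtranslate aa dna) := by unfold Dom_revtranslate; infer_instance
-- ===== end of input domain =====

-- B works run-wise: it splits aa on '-' into gap-free runs, takes ONE DNA slice of length
-- 3*len(run) per run, and joins the run translations with "---" (objective: faster, measured).

-- ===== PORT A =====
-- literal port of A: a foldl over aa carrying (seq, i); "".join(seq) is flatten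
def revtranslate (aa : String) (dna : String) : String :=
  let r := aa.toList.foldl
    (fun (st : List (List Char) × Int) a =>
      if a = '-' then (st.1 ++ [['-', '-', '-']], st.2)
      else (st.1 ++ [PySem.List.slice dna.toList (some st.2) (some (st.2 + 3))], st.2 + 3))
    ([], 0)
  String.ofList r.1.flatten

-- ===== PORT B =====
-- Source B: for part in aa.split('-'): append dna[pos:pos+3*len(part)]; then '---'.join(runs)
def revtranslate_alt (aa : String) (dna : String) : String :=
  let parts := PySem.Chars.splitOn aa.toList ['-']
  let r := parts.foldl
    (fun (st : List (List Char) × Int) part =>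
      let e := st.2 + 3 * (part.length : Int)
      (st.1 ++ [PySem.List.slice dna.toList (some st.2) (some e)], e))
    ([], 0)
  String.ofList (PySem.Chars.join ['-', '-', '-'] r.1)

-- ===== PRECONDITION & SPEC =====
def Spec_revtranslate (aa : String) (dna : String) (out : String) : Prop := out = revtranslate_alt aa dna
instance (aa : String) (dna : String) (out : String) : Decidable (Spec_revtranslate aa dna out) := by unfold Spec_revtranslate; infer_instance

-- ===== CLAIM (what is proved, stated in full; the proofs are below) =====
def Claim_equal_revtranslate : Prop := ∀ (aa : String) (dna : String), Dom_revtranslate aa dna → Spec_revtranslate aa dna (revtranslate aa dna)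

-- ===== LEMMAS AND PROOFS =====

-- reference recursion for A's output: consume the not-yet-used DNA suffix
def revtrGo : List Char → List Char → List Char
  | [], _ => []
  | a :: rest, s =>
    if a = '-' then '-' :: '-' :: '-' :: revtrGo rest s
    else s.take 3 ++ revtrGo rest (s.drop 3)

-- structural version of split-on-'-'
def sd : List Char → List (List Char)
  | [] => [[]]
  | c :: r =>
    if c = '-' then [] :: sd r
    else
      match sd r with
      | p :: ps => (c :: p) :: ps
      | [] => [[c]]

theorem sd_ne_nil (l : List Char) : sd l ≠ [] := by
  match l with
  | [] => simp [sd]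
  | c :: r =>
    simp only [sd]
    split_ifs
    · simp
    · cases h : sd r <;> simp

theorem splitOn_go_eq (l : List Char) : ∀ (fuel : Nat) (cur : List Char) (acc : List (List Char)),
    l.length < fuel →
    PySem.Chars.splitOn.go ['-'] fuel l cur acc
      = acc.reverse ++ (cur.reverse ++ (sd l).headD []) :: (sd l).tail := by
  induction l with
  | nil =>
    intro fuel cur acc h
    match fuel with
    | f + 1 => simp [PySem.Chars.splitOn.go, sd]
  | cons c rest ih =>
    intro fuel cur acc h
    match fuel with
    | f + 1 =>
      obtain ⟨p, ps, hsd⟩ : ∃ p ps, sd rest = p :: ps := by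
        cases h : sd rest with
        | nil => exact absurd h (sd_ne_nil rest)
        | cons p ps => exact ⟨p, ps, rfl⟩
      by_cases hc : c = '-'
      · subst hc
        rw [PySem.Chars.splitOn.go]
        simp only [List.length_cons] at h
        rw [if_pos (by simp [List.isPrefixOf])]
        simp only [List.length_singleton, List.drop_succ_cons, List.drop_zero]
        rw [ih f [] (cur.reverse :: acc) (by omega)]
        simp [sd, hsd]
      · rw [PySem.Chars.splitOn.go]
        rw [if_neg (by simp [List.isPrefixOf]; exact fun h => absurd h.symm hc)]
        rw [ih f (c :: cur) acc (by simp at h; omega)]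
        simp [sd, hc, hsd]

theorem splitOn_eq_sd (l : List Char) : PySem.Chars.splitOn l ['-'] = sd l := by
  obtain ⟨p, ps, hsd⟩ : ∃ p ps, sd l = p :: ps := by
    cases h : sd l with
    | nil => exact absurd h (sd_ne_nil l)
    | cons p ps => exact ⟨p, ps, rfl⟩
  rw [PySem.Chars.splitOn, splitOn_go_eq l (l.length + 1) [] [] (by omega)]
  simp [hsd]

-- A's fold flattened equals the reference recursion
theorem foldA_eq (aa : List Char) (D : List Char) (acc : List (List Char)) (k : Nat) :
    (aa.foldl
      (fun (st : List (List Char) × Int) a =>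
        if a = '-' then (st.1 ++ [['-', '-', '-']], st.2)
        else (st.1 ++ [PySem.List.slice D (some st.2) (some (st.2 + 3))], st.2 + 3))
      (acc, (k : Int))).1.flatten = acc.flatten ++ revtrGo aa (D.drop k) := by
  induction aa generalizing acc k with
  | nil => simp [revtrGo]
  | cons a rest ih =>
    by_cases h : a = '-'
    · simp only [List.foldl_cons, h, reduceIte]
      rw [ih (acc ++ [['-', '-', '-']]) k]
      simp [revtrGo, List.append_assoc]
    · simp only [List.foldl_cons, h, reduceIte]
      have hsl : PySem.List.slice D (some (k : Int)) (some ((k : Int) + 3))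
          = (D.drop k).take 3 := by simpa using PySem.List.slice_natCast_add D k 3
      have hk3 : ((k : Int) + 3) = ((k + 3 : Nat) : Int) := by push_cast; ring
      rw [hsl, hk3, ih (acc ++ [(D.drop k).take 3]) (k + 3)]
      simp [revtrGo, h, ← List.drop_drop, List.append_assoc]

-- the list of slices B's fold collects, one per run
def partsSlices : List (List Char) → List Char → Nat → List (List Char)
  | [], _, _ => []
  | p :: ps, D, k => (D.drop k).take (3 * p.length) :: partsSlices ps D (k + 3 * p.length)

theorem foldB_eq (parts : List (List Char)) (D : List Char) (acc : List (List Char)) (k : Nat) :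
    (parts.foldl
      (fun (st : List (List Char) × Int) part =>
        (st.1 ++ [PySem.List.slice D (some st.2) (some (st.2 + 3 * (part.length : Int)))],
          st.2 + 3 * (part.length : Int)))
      (acc, (k : Int))).1 = acc ++ partsSlices parts D k := by
  induction parts generalizing acc k with
  | nil => simp [partsSlices]
  | cons p ps ih =>
    have hsl : PySem.List.slice D (some (k : Int)) (some ((k : Int) + 3 * (p.length : Int)))
        = (D.drop k).take (3 * p.length) := by
      have := PySem.List.slice_natCast_add D k (3 * p.length)
      rw [← this]; push_cast; ring_nf
    have hk : ((k : Int) + 3 * (p.length : Int)) = ((k + 3 * p.length : Nat) : Int) := by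
      push_cast; ring
    simp only [List.foldl_cons, hsl]
    rw [hk, ih (acc ++ [(D.drop k).take (3 * p.length)]) (k + 3 * p.length)]
    simp [partsSlices, List.append_assoc]

theorem join_append_head (sep a x : List Char) (L : List (List Char)) :
    PySem.Chars.join sep ((a ++ x) :: L) = a ++ PySem.Chars.join sep (x :: L) := by
  cases L with
  | nil => simp [PySem.Chars.join, List.intercalate]
  | cons y ys =>
    rw [PySem.Chars.join_cons_cons, PySem.Chars.join_cons_cons]
    simp [List.append_assoc]

-- the core equivalence: joining B's run slices gives the reference recursion
theorem joinS (aa : List Char) (D : List Char) : ∀ (k : Nat),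
    PySem.Chars.join ['-', '-', '-'] (partsSlices (sd aa) D k) = revtrGo aa (D.drop k) := by
  induction aa with
  | nil =>
    intro k
    simp [sd, partsSlices, revtrGo, PySem.Chars.join, List.intercalate]
  | cons c rest ih =>
    intro k
    obtain ⟨p, ps, hsd⟩ : ∃ p ps, sd rest = p :: ps := by
      cases h : sd rest with
      | nil => exact absurd h (sd_ne_nil rest)
      | cons p ps => exact ⟨p, ps, rfl⟩
    by_cases hc : c = '-'
    · subst hc
      have hIH := ih k
      rw [hsd] at hIH
      simp only [partsSlices] at hIH
      simp only [sd, reduceIte]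
      rw [hsd]
      simp only [partsSlices, List.length_nil, Nat.mul_zero, List.take_zero, Nat.add_zero]
      rw [PySem.Chars.join_cons_cons, hIH]
      simp [revtrGo]
    · have hIH := ih (k + 3)
      rw [hsd] at hIH
      simp only [partsSlices] at hIH
      simp only [sd, hc, reduceIte, hsd, partsSlices]
      have hsplit : (D.drop k).take (3 * (p.length + 1))
          = (D.drop k).take 3 ++ (D.drop (k + 3)).take (3 * p.length) := by
        rw [show 3 * (p.length + 1) = 3 + 3 * p.length by ring, List.take_add]
        simp [List.drop_drop]
      rw [List.length_cons, hsplit, join_append_head,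
          show k + 3 * (p.length + 1) = k + 3 + 3 * p.length by ring, hIH]
      simp [revtrGo, hc, List.drop_drop]

-- ===== VERDICT (by name: the statement is the Claim_ definition above) =====
theorem revtranslate_spec : Claim_equal_revtranslate := by
  intro aa dna _
  show revtranslate aa dna = revtranslate_alt aa dna
  simp only [revtranslate, revtranslate_alt]
  have hA := foldA_eq aa.toList dna.toList [] 0
  simp only [Nat.cast_zero, List.drop_zero, List.flatten_nil, List.nil_append] at hA
  have hB := foldB_eq (PySem.Chars.splitOn aa.toList ['-']) dna.toList [] 0
  simp only [Nat.cast_zero, List.nil_append] at hB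
  rw [hA, hB, splitOn_eq_sd, joinS aa.toList dna.toList 0]
  simp
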